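-- pv_equiv track=rewrite | github.com/abitabir/ScaleyStuffs | uni/UG1/Term 1/SOF1/Paper/Sample Paper/Question 1.py | to_barcode
-- ===== SOURCE A (Python) =====
-- def to_barcode(binary_string):
--     """Return binary string converted to barcode.
--
--     Args:
--         binary_string: string of 1s and 0s only
--     Returns:
--         bar_code: bariable contains string of |s and .s modelling a barcode,
--         however if invalid character in binary_string comtains None.
-- """
--     bar_code = ""
--     for char in binary_string:
--         if char == '0':
--             bar_code += '.'
--         elif char == '1':
--             bar_code += '|'
--         elif char == '' or ' ':
--             return None
--         else:
--             raise ValueError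
--     return bar_code
-- ===== SOURCE B (Python) =====
-- def to_barcode(binary_string):
--     if any(c not in '01' for c in binary_string):
--         return None
--     return binary_string.translate(str.maketrans('01', '.|'))
-- ===== Notes on version B (the rewrite author's own statement) =====
-- stated objective: simpler
-- what changed: Replaces the single interleaved per-character loop with two passes: one membership scan that validates, then a one-shot str.translate mapping.
import Mathlib
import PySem

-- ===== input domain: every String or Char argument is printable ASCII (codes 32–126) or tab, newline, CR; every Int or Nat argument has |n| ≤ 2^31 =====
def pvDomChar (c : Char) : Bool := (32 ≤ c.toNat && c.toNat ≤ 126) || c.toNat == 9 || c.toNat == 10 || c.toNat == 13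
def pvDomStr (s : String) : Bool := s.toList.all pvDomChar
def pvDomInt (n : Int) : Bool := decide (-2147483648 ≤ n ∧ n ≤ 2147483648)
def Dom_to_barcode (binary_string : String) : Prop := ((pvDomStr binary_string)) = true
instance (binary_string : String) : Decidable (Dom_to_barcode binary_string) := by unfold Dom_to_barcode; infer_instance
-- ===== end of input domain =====

-- B separates validation (one membership scan) from mapping (one translate pass),
-- instead of A's single interleaved per-character loop; objective: simpler.

-- ===== PORT A =====
-- A's loop: build bar_code by appending per character; any char other than '0'/'1'
-- hits the `elif char == '' or ' '` branch (always truthy) and returns None.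
def toBarcodeLoop : List Char → String → Option String
  | [], bar_code => some bar_code
  | c :: rest, bar_code =>
    if c = '0' then toBarcodeLoop rest (bar_code ++ ".")
    else if c = '1' then toBarcodeLoop rest (bar_code ++ "|")
    else none

def to_barcode (binary_string : String) : Option String :=
  toBarcodeLoop binary_string.toList ""

-- ===== PORT B =====
def to_barcode_alt (binary_string : String) : Option String :=
  if binary_string.toList.any (fun c => !(c = '0' || c = '1')) then none
  else some (String.ofList (binary_string.toList.map (fun c => if c = '0' then '.' else '|')))

-- ===== PRECONDITION & SPEC =====
def Spec_to_barcode (binary_string : String) (out : Option String) : Prop := out = to_barcode_alt binary_string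
instance (binary_string : String) (out : Option String) : Decidable (Spec_to_barcode binary_string out) := by unfold Spec_to_barcode; infer_instance

-- ===== CLAIM (what is proved, stated in full; the proofs are below) =====
def Claim_equal_to_barcode : Prop := ∀ (binary_string : String), Dom_to_barcode binary_string → Spec_to_barcode binary_string (to_barcode binary_string)

-- ===== LEMMAS AND PROOFS =====
theorem toBarcodeLoop_eq (cs : List Char) (acc : String) :
    toBarcodeLoop cs acc =
      if cs.any (fun c => !(c = '0' || c = '1')) then none
      else some (acc ++ String.ofList (cs.map (fun c => if c = '0' then '.' else '|'))) := by
  induction cs generalizing acc with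
  | nil => simp [toBarcodeLoop]
  | cons c rest ih =>
    by_cases h0 : c = '0'
    · subst h0
      simp [toBarcodeLoop, ih, List.any_cons]
      split_ifs with h
      · rfl
      · congr 1
        apply String.ext
        simp
    · by_cases h1 : c = '1'
      · subst h1
        simp [toBarcodeLoop, ih, List.any_cons]
        split_ifs with h
        · rfl
        · congr 1
          apply String.ext
          simp
      · simp [toBarcodeLoop, h0, h1, List.any_cons]

-- ===== VERDICT (by name: the statement is the Claim_ definition above) =====
theorem to_barcode_spec : Claim_equal_to_barcode := by
  intro s _
  unfold Spec_to_barcode to_barcode to_barcode_alt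
  rw [toBarcodeLoop_eq]
  split_ifs with h
  · rfl
  · simp
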